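-- pv_equiv track=rewrite | github.com/nietsneuah/fm-cp | src/fm_cp/__main__.py | _count_delimiters
-- ===== SOURCE A (Python) =====
-- def _count_delimiters(text):
--     """Count unbalanced (), [] in text, respecting quotes.
--     Returns (paren_depth, bracket_depth)."""
--     paren = 0
--     bracket = 0
--     in_quote = False
--     escape = False
--     for ch in text:
--         if escape:
--             escape = False
--             continue
--         if ch == '\\':
--             escape = True
--             continue
--         if ch == '"':
--             in_quote = not in_quote
--             continue
--         if in_quote:
--             continue
--         if ch == '(':
--             paren += 1
--         elif ch == ')':
--             paren -= 1
--         elif ch == '[':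
--             bracket += 1
--         elif ch == ']':
--             bracket -= 1
--     return paren, bracket
-- ===== SOURCE B (Python) =====
-- def _count_delimiters(text):
--     """Count unbalanced (), [] in text, respecting quotes (transform-then-count)."""
--     # phase 1: drop every backslash-escaped pair (a lone trailing backslash is dropped too)
--     cleaned = []
--     i = 0
--     n = len(text)
--     while i < n:
--         if text[i] == '\\':
--             i += 2
--         else:
--             cleaned.append(text[i])
--             i += 1
--     # phase 2: split on '"'; even-index segments are the text outside quotes
--     outside = ''.join(''.join(cleaned).split('"')[::2])
--     # phase 3: count
--     return (outside.count('(') - outside.count(')'),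
--             outside.count('[') - outside.count(']'))
-- ===== Notes on version B (the rewrite author's own statement) =====
-- stated objective: alternative
-- what changed: Replaced the char-by-char four-variable state machine by a three-phase pipeline: delete backslash-escaped pairs, split the cleaned text on the double-quote character keeping only the even-index (outside-quote) segments, then count the four delimiters with str.count.
import Mathlib
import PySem

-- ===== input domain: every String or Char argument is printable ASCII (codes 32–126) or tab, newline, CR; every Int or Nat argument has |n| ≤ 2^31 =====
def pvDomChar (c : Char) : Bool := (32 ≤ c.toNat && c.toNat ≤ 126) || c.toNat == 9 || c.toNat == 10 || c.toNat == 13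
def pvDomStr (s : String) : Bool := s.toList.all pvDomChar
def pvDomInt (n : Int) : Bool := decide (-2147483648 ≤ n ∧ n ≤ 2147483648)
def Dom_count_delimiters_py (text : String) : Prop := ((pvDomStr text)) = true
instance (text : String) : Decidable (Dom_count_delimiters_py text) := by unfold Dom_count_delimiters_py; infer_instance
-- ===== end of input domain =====

-- B replaces A's char-by-char four-variable state machine by a three-phase pipeline
-- (strip escaped pairs, split on '"' keeping even segments, count); an alternative of the same cost.


-- ===== PORT A =====
-- state = (paren, bracket, in_quote, escape); one fold step per character, branches in A's order
def pvStepA (s : Int × Int × Bool × Bool) (ch : Char) : Int × Int × Bool × Bool :=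
  let (p, b, q, e) := s
  if e then (p, b, q, false)
  else if ch = '\\' then (p, b, q, true)
  else if ch = '"' then (p, b, !q, e)
  else if q then (p, b, q, e)
  else if ch = '(' then (p + 1, b, q, e)
  else if ch = ')' then (p - 1, b, q, e)
  else if ch = '[' then (p, b + 1, q, e)
  else if ch = ']' then (p, b - 1, q, e)
  else (p, b, q, e)

def count_delimiters_py (text : String) : Int × Int :=
  let r := text.toList.foldl pvStepA (0, 0, false, false)
  (r.1, r.2.1)

-- ===== PORT B =====
-- phase 1: drop every backslash-escaped pair (a lone trailing backslash is dropped too)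
def pvUnescape : List Char → List Char
  | [] => []
  | '\\' :: [] => []
  | '\\' :: _ :: r => pvUnescape r
  | c :: r => c :: pvUnescape r

-- phase 2a: split on '"'  (str.split('"'), hand-ported exactly: k separators give k+1 segments)
def pvSplitQ : List Char → List (List Char)
  | [] => [[]]
  | '"' :: r => [] :: pvSplitQ r
  | c :: r =>
    match pvSplitQ r with
    | [] => [[c]]
    | s :: ss => (c :: s) :: ss

-- phase 2b: the segments at even indices  ([::2])
def pvEvens {α : Type} : List α → List α
  | [] => []
  | [x] => [x]
  | x :: _ :: r => x :: pvEvens r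

def count_delimiters_py_alt (text : String) : Int × Int :=
  let outside := (pvEvens (pvSplitQ (pvUnescape text.toList))).flatten
  ((outside.count '(' : Int) - (outside.count ')' : Int),
   (outside.count '[' : Int) - (outside.count ']' : Int))

-- ===== PRECONDITION & SPEC =====
def Spec_count_delimiters_py (text : String) (out : Int × Int) : Prop := out = count_delimiters_py_alt text
instance (text : String) (out : Int × Int) : Decidable (Spec_count_delimiters_py text out) := by unfold Spec_count_delimiters_py; infer_instance

-- ===== CLAIM (what is proved, stated in full; the proofs are below) =====
def Claim_equal_count_delimiters_py : Prop := ∀ (text : String), Dom_count_delimiters_py text → Spec_count_delimiters_py text (count_delimiters_py text)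

-- ===== LEMMAS AND PROOFS =====

-- the characters A's machine counts, starting with in_quote = q and escape off
def pvVis : Bool → List Char → List Char
  | _, [] => []
  | _, '\\' :: [] => []
  | q, '\\' :: _ :: r => pvVis q r
  | q, '"' :: r => pvVis (!q) r
  | q, c :: r => if q then pvVis q r else c :: pvVis q r

-- quote-only visibility (what remains after phase 1)
def pvVisQ : Bool → List Char → List Char
  | _, [] => []
  | q, '"' :: r => pvVisQ (!q) r
  | q, c :: r => if q then pvVisQ q r else c :: pvVisQ q r

def pvOdds {α : Type} : List α → List α
  | [] => []
  | _ :: r => pvEvens r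

lemma pvEvens_cons {α : Type} (x : α) (r : List α) : pvEvens (x :: r) = x :: pvOdds r := by
  cases r <;> simp [pvEvens, pvOdds]

lemma pvOdds_cons {α : Type} (x : α) (r : List α) : pvOdds (x :: r) = pvEvens r := rfl

lemma pvVis_eq (q : Bool) (l : List Char) : pvVis q l = pvVisQ q (pvUnescape l) := by
  induction q, l using pvVis.induct <;> simp_all [pvVis, pvVisQ, pvUnescape]

lemma pvFold_vis (q : Bool) (l : List Char) : ∀ (p b : Int),
    (l.foldl pvStepA (p, b, q, false)).1
      = p + ((pvVis q l).count '(' : Int) - ((pvVis q l).count ')' : Int) ∧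
    (l.foldl pvStepA (p, b, q, false)).2.1
      = b + ((pvVis q l).count '[' : Int) - ((pvVis q l).count ']' : Int) := by
  induction q, l using pvVis.induct with
  | case1 => simp [pvVis]
  | case2 => intro p b; simp [pvVis, pvStepA, List.foldl]
  | case3 q c r ih => intro p b; simpa [pvVis, pvStepA, List.foldl] using ih p b
  | case4 q r ih => intro p b; simpa [pvVis, pvStepA, List.foldl] using ih p b
  | case5 c r h1 h2 h3 ih =>
    intro p b
    have hb : c ≠ '\\' := by
      intro h; cases r with | nil => exact h1 h rfl | cons a t => exact h2 a t h rfl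
    have hq3 : c ≠ '"' := fun h => h3 h
    simpa [pvVis, pvStepA, List.foldl, hb, hq3] using ih p b
  | case6 q c r h1 h2 h3 hq ih =>
    intro p b
    have hb : c ≠ '\\' := by
      intro h; cases r with | nil => exact h1 h rfl | cons a t => exact h2 a t h rfl
    have hq3 : c ≠ '"' := fun h => h3 h
    have hq' : q = false := by simpa using hq
    subst hq'
    by_cases h4 : c = '(' <;> by_cases h5 : c = ')' <;> by_cases h6 : c = '[' <;> by_cases h7 : c = ']' <;>
      (try subst h4) <;> (try subst h5) <;> (try subst h6) <;> (try subst h7) <;>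
      simp_all [pvVis, pvStepA, List.foldl] <;>
      omega

lemma pvEvens_splitQ (l : List Char) :
    (pvEvens (pvSplitQ l)).flatten = pvVisQ false l ∧
    (pvOdds (pvSplitQ l)).flatten = pvVisQ true l := by
  induction l with
  | nil => simp [pvSplitQ, pvEvens, pvOdds, pvVisQ]
  | cons c r ih =>
    by_cases hc : c = '"'
    · subst hc
      simp [pvSplitQ, pvVisQ, pvEvens_cons, pvOdds_cons, ih.1, ih.2]
    · have hs : pvSplitQ (c :: r) =
        match pvSplitQ r with
        | [] => [[c]]
        | s :: ss => (c :: s) :: ss := by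
          simp [pvSplitQ]
      cases h : pvSplitQ r with
      | nil =>
        exfalso
        revert h
        induction r with
        | nil => simp [pvSplitQ]
        | cons d t iht =>
          by_cases hd : d = '"'
          · subst hd; simp [pvSplitQ]
          · simp [pvSplitQ]; split <;> simp
      | cons s ss =>
        rw [h] at ih
        rw [hs, h]
        have h1 : (pvEvens ((c :: s) :: ss)).flatten = c :: (pvEvens (s :: ss)).flatten := by
          simp [pvEvens_cons]
        have h2 : pvOdds ((c :: s) :: ss) = pvOdds (s :: ss) := by simp [pvOdds_cons]
        refine ⟨?_, ?_⟩
        · rw [h1, ih.1]; simp [pvVisQ]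
        · rw [h2, ih.2]; simp [pvVisQ]

-- ===== VERDICT (by name: the statement is the Claim_ definition above) =====
theorem count_delimiters_py_spec : Claim_equal_count_delimiters_py := by
  intro text _
  unfold Spec_count_delimiters_py count_delimiters_py count_delimiters_py_alt
  have hf := pvFold_vis false text.toList 0 0
  have hv := pvVis_eq false text.toList
  have he := (pvEvens_splitQ (pvUnescape text.toList)).1
  simp [hf.1, hf.2, hv, he]
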